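-- pv_equiv track=rewrite | github.com/quangdang46/TH-DSTT | Assignment2022/52100174.py | req2
-- ===== SOURCE A (Python) =====
-- def req2(products):
--     list_name=[]
--     list_values=[]
--     list_min=[]
--     list_max=[]
--     for k in products:
--         list_name.append(k[0].strip())
--         list_values.append(int(k[2]))
--     min_value=min(list_values)
--     max_value=max(list_values)
--     for key,value in zip(list_name,list_values):
--         if value==max_value:
--             list_max.append(key)
--         elif value==min_value:
--             list_min.append(key)
--     list_min.sort()
--     list_max.sort()
--     return list_max,list_min
-- ===== SOURCE B (Python) =====
-- def req2(products):
--     groups = {}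
--     for k in products:
--         v = int(k[2])
--         groups[v] = groups.get(v, []) + [k[0].strip()]
--     max_value = max(groups)
--     min_value = min(groups)
--     list_max = sorted(groups[max_value])
--     list_min = sorted(groups[min_value]) if min_value != max_value else []
--     return list_max, list_min
-- ===== Notes on version B (the rewrite author's own statement) =====
-- stated objective: alternative
-- what changed: Single group-by pass building a dict from value to the list of stripped names, then max/min over the dict's keys and a sort of just the two relevant groups, instead of A's parallel name/value lists plus a second zip scan with an if/elif accumulator.
import Mathlib
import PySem

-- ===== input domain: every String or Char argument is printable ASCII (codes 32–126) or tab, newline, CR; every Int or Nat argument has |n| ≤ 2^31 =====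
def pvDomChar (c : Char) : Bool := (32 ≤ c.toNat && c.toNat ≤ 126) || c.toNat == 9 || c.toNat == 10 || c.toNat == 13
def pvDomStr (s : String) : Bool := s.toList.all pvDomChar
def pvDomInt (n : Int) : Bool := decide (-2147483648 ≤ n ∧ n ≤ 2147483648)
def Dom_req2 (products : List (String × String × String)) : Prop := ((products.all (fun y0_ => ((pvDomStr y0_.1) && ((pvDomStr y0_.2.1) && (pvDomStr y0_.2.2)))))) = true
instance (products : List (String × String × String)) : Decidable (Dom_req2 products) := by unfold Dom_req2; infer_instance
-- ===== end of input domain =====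

-- B replaces A's parallel name/value lists and second zip scan by a single group-by dict from value
-- to stripped names, taking max/min over the dict's keys; alternative decomposition, same cost.

-- ===== PORT A =====
def req2 (products : List (String × String × String)) : List String × List String :=
  let list_name := products.foldl (fun acc k => acc ++ [PySem.Str.strip k.1]) []
  let list_values := products.foldl (fun acc k => acc ++ [(PySem.Int.ofStr? k.2.2).getD 0]) []
  let min_value := (PySem.List.min? list_values (fun x => x)).getD 0
  let max_value := (PySem.List.max? list_values (fun x => x)).getD 0
  let mm := (list_name.zip list_values).foldl
    (fun (p : List String × List String) kv =>
      if kv.2 == max_value then (p.1 ++ [kv.1], p.2)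
      else if kv.2 == min_value then (p.1, p.2 ++ [kv.1])
      else p) ([], [])
  (PySem.List.sorted mm.1 (fun x => x) false, PySem.List.sorted mm.2 (fun x => x) false)

-- ===== PORT B =====
def req2_alt (products : List (String × String × String)) : List String × List String :=
  let groups : PySem.Dict Int (List String) :=
    products.foldl (fun d k =>
      d.modify ((PySem.Int.ofStr? k.2.2).getD 0) [] (fun old => old ++ [PySem.Str.strip k.1]))
      PySem.Dict.empty
  let max_value := (PySem.List.max? (PySem.Dict.keys groups) (fun x => x)).getD 0
  let min_value := (PySem.List.min? (PySem.Dict.keys groups) (fun x => x)).getD 0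
  let list_max := PySem.List.sorted (groups.getD max_value []) (fun x => x) false
  let list_min := if min_value != max_value
                  then PySem.List.sorted (groups.getD min_value []) (fun x => x) false
                  else []
  (list_max, list_min)

-- ===== PRECONDITION & SPEC =====
-- Pre_ excludes exactly the inputs where A raises: the empty list (min/max of an empty sequence,
-- ValueError) and any product whose third field is not a valid int literal (int(), ValueError).
def Pre_req2 (products : List (String × String × String)) : Prop :=
  products ≠ [] ∧ ∀ k ∈ products, (PySem.Int.ofStr? k.2.2).isSome = true
instance (products : List (String × String × String)) : Decidable (Pre_req2 products) := by
  unfold Pre_req2; infer_instance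

def pvWitness_req2 : (List (String × String × String)) :=
  [("apple ", "u", "3"), (" pear", "v", " 1 "), ("fig", "w", "3")]

def Spec_req2 (products : List (String × String × String)) (out : List String × List String) : Prop := out = req2_alt products
instance (products : List (String × String × String)) (out : List String × List String) : Decidable (Spec_req2 products out) := by unfold Spec_req2; infer_instance

-- ===== CLAIM (what is proved, stated in full; the proofs are below) =====
def Claim_equal_req2 : Prop := ∀ (products : List (String × String × String)), Dom_req2 products → Pre_req2 products → Spec_req2 products (req2 products)

-- ===== LEMMAS AND PROOFS =====

-- A's second loop (if/elif with a pair accumulator) as two filters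
lemma foldl_elif (l : List (String × Int)) (mx mn : Int) (a b : List String) :
    l.foldl (fun (p : List String × List String) kv =>
      if kv.2 == mx then (p.1 ++ [kv.1], p.2)
      else if kv.2 == mn then (p.1, p.2 ++ [kv.1])
      else p) (a, b)
    = (a ++ (l.filter (fun kv => kv.2 == mx)).map (fun kv => kv.1),
       b ++ (l.filter (fun kv => !(kv.2 == mx) && (kv.2 == mn))).map (fun kv => kv.1)) := by
  induction l generalizing a b with
  | nil => simp
  | cons x t ih =>
    simp only [List.foldl_cons]
    by_cases h1 : x.2 = mx
    · rw [if_pos (by simp [h1]), ih]; simp [h1]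
    · by_cases h2 : x.2 = mn
      · have h3 : ¬ (mn = mx) := fun e => h1 (h2.trans e)
        rw [if_neg (by simp [h1]), if_pos (by simp [h2]), ih]
        simp [h2, h3]
      · rw [if_neg (by simp [h1]), if_neg (by simp [h2]), ih]; simp [h1, h2]

-- first extremal elements of two lists with the same members are equal (key = id)
lemma max_eq_of_mem_iff {l1 l2 : List Int} {m1 m2 : Int}
    (h1 : PySem.List.max? l1 (fun x => x) = some m1)
    (h2 : PySem.List.max? l2 (fun x => x) = some m2)
    (hm : ∀ x, x ∈ l1 ↔ x ∈ l2) : m1 = m2 :=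
  le_antisymm
    (PySem.List.max?_isMax h2 m1 ((hm m1).1 (PySem.List.max?_mem h1)))
    (PySem.List.max?_isMax h1 m2 ((hm m2).2 (PySem.List.max?_mem h2)))

lemma min_eq_of_mem_iff {l1 l2 : List Int} {m1 m2 : Int}
    (h1 : PySem.List.min? l1 (fun x => x) = some m1)
    (h2 : PySem.List.min? l2 (fun x => x) = some m2)
    (hm : ∀ x, x ∈ l1 ↔ x ∈ l2) : m1 = m2 :=
  le_antisymm
    (PySem.List.min?_isMin h1 m2 ((hm m2).2 (PySem.List.min?_mem h2)))
    (PySem.List.min?_isMin h2 m1 ((hm m1).1 (PySem.List.min?_mem h1)))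

-- ===== VERDICT (by name: the statement is the Claim_ definition above) =====
theorem req2_spec : Claim_equal_req2 := by
  intro products _ hPre
  obtain ⟨hne, _⟩ := hPre
  show req2 products = req2_alt products
  unfold req2 req2_alt
  simp only [PySem.List.foldl_append_singleton_eq_map, List.nil_append, List.zip_map']
  -- B's dict, as a fold over (value, name) pairs
  have hdict :
      products.foldl (fun (d : PySem.Dict Int (List String)) k =>
        d.modify ((PySem.Int.ofStr? k.2.2).getD 0) [] (fun old => old ++ [PySem.Str.strip k.1]))
        PySem.Dict.empty
      = (products.map (fun a => ((PySem.Int.ofStr? a.2.2).getD 0, PySem.Str.strip a.1))).foldl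
          (fun d p => d.modify p.1 [] (fun x => x ++ [p.2])) PySem.Dict.empty := by
    rw [List.foldl_map]
  rw [hdict]
  -- keys of the group dict have the same members as the value list
  have hkeys : (PySem.Dict.keys
      ((products.map (fun a => ((PySem.Int.ofStr? a.2.2).getD 0, PySem.Str.strip a.1))).foldl
        (fun d p => d.modify p.1 [] (fun x => x ++ [p.2])) PySem.Dict.empty))
      = PySem.Set.ofList (products.map (fun x => (PySem.Int.ofStr? x.2.2).getD 0)) := by
    have h := PySem.Dict.keys_foldl_modify_key
      (l := products.map (fun a => ((PySem.Int.ofStr? a.2.2).getD 0, PySem.Str.strip a.1)))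
      (key := fun p => p.1) (d0 := ([] : List String))
      (f := fun _ p => fun old => old ++ [p.2]) (d := PySem.Dict.empty)
    refine h.trans ?_
    simp only [PySem.Set.update, PySem.Set.ofList_eq_foldl, List.map_map, PySem.Dict.keys_empty]
    rfl
  rw [hkeys]
  have hmem : ∀ x : Int,
      x ∈ PySem.Set.ofList (products.map (fun x => (PySem.Int.ofStr? x.2.2).getD 0)) ↔
      x ∈ products.map (fun x => (PySem.Int.ofStr? x.2.2).getD 0) :=
    fun x => PySem.Set.mem_ofList _ x
  -- both max?/min? return some on a nonempty list
  have hvne : products.map (fun x => (PySem.Int.ofStr? x.2.2).getD 0) ≠ [] := by simpa using hne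
  have hkne : PySem.Set.ofList (products.map (fun x => (PySem.Int.ofStr? x.2.2).getD 0)) ≠ [] := by
    intro h
    have hx := (hmem ((PySem.Int.ofStr? (products.head hne).2.2).getD 0)).2
      (List.mem_map_of_mem (List.head_mem hne))
    simp [h] at hx
  obtain ⟨mxA, hmxA⟩ := Option.ne_none_iff_exists'.1
    (by simpa [PySem.List.max?_eq_none_iff] using hvne :
      PySem.List.max? (products.map (fun x => (PySem.Int.ofStr? x.2.2).getD 0)) (fun x => x) ≠ none)
  obtain ⟨mnA, hmnA⟩ := Option.ne_none_iff_exists'.1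
    (by simpa [PySem.List.min?_eq_none_iff] using hvne :
      PySem.List.min? (products.map (fun x => (PySem.Int.ofStr? x.2.2).getD 0)) (fun x => x) ≠ none)
  obtain ⟨mxB, hmxB⟩ := Option.ne_none_iff_exists'.1
    (by simpa [PySem.List.max?_eq_none_iff] using hkne :
      PySem.List.max? (PySem.Set.ofList (products.map (fun x => (PySem.Int.ofStr? x.2.2).getD 0)))
        (fun x => x) ≠ none)
  obtain ⟨mnB, hmnB⟩ := Option.ne_none_iff_exists'.1
    (by simpa [PySem.List.min?_eq_none_iff] using hkne :
      PySem.List.min? (PySem.Set.ofList (products.map (fun x => (PySem.Int.ofStr? x.2.2).getD 0)))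
        (fun x => x) ≠ none)
  have hmx : mxA = mxB := max_eq_of_mem_iff hmxA hmxB (fun x => (hmem x).symm)
  have hmn : mnA = mnB := min_eq_of_mem_iff hmnA hmnB (fun x => (hmem x).symm)
  rw [hmx] at hmxA; rw [hmn] at hmnA
  -- each group is the corresponding filter of the (name, value) pairs
  have hgrp : ∀ v : Int,
      ((products.map (fun a => ((PySem.Int.ofStr? a.2.2).getD 0, PySem.Str.strip a.1))).foldl
        (fun d p => d.modify p.1 [] (fun x => x ++ [p.2])) PySem.Dict.empty).getD v []
      = ((products.map (fun a => (PySem.Str.strip a.1, (PySem.Int.ofStr? a.2.2).getD 0))).filter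
          (fun kv => kv.2 == v)).map (fun kv => kv.1) := by
    intro v
    rw [PySem.Dict.getD_foldl_modify_append, PySem.Dict.getD_empty]
    simp only [List.filter_map, List.map_map, List.nil_append]
    rfl
  simp only [hmxA, hmnA, hmxB, hmnB, Option.getD_some]
  rw [foldl_elif (products.map (fun a => (PySem.Str.strip a.1, (PySem.Int.ofStr? a.2.2).getD 0)))
    mxB mnB [] [], hgrp mxB, hgrp mnB]
  simp only [List.nil_append]
  refine Prod.ext rfl ?_
  by_cases hcase : mnB = mxB
  · subst hcase
    have hfilt : ((products.map (fun a => (PySem.Str.strip a.1, (PySem.Int.ofStr? a.2.2).getD 0))).filter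
        (fun kv => !(kv.2 == mnB) && (kv.2 == mnB))) = [] := by
      simp
    simp only [hfilt, List.map_nil, bne_self_eq_false, Bool.false_eq_true, if_false]
    exact (PySem.List.sorted_eq_nil_iff _ _ _).2 rfl
  · have hfilt : ((products.map (fun a => (PySem.Str.strip a.1, (PySem.Int.ofStr? a.2.2).getD 0))).filter
        (fun kv => !(kv.2 == mxB) && (kv.2 == mnB)))
        = ((products.map (fun a => (PySem.Str.strip a.1, (PySem.Int.ofStr? a.2.2).getD 0))).filter
          (fun kv => kv.2 == mnB)) := by
      apply List.filter_congr
      intro x _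
      by_cases h : x.2 = mnB
      · simp [h, hcase]
      · simp [h]
    have hne' : (mnB != mxB) = true := by simp [hcase]
    rw [hfilt, if_pos hne']
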